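-- pv_equiv track=rewrite | github.com/CvanderStoep/adventofcode2017 | day1.py | calculate_circular_sum_half
-- ===== SOURCE A (Python) =====
-- def calculate_circular_sum_half(number: int) -> int:
--     digits = str(number)
--     circular_sum = 0
--     length = len(digits)
--     for i in range(length):
--         if digits[i] == digits[(i+length//2)%length]:
--             circular_sum += int(digits[i])
--
--     return circular_sum
-- ===== SOURCE B (Python) =====
-- def calculate_circular_sum_half(number: int) -> int:
--     s = str(number)
--     n = len(s)
--     h = n // 2
--     if n % 2 == 0:
--         # even length: i and i+h pair up symmetrically, so compare the two
--         # halves once and double the matched digits (half the comparisons)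
--         return 2 * sum(int(a) for a, b in zip(s[:h], s[h:]) if a == b)
--     # odd length: the step-by-h map is a single n-cycle; walk that cycle once,
--     # comparing consecutive positions on it (subtract-based wraparound, no %)
--     total = 0
--     j = 0
--     for _ in range(n):
--         nj = j + h
--         if nj >= n:
--             nj -= n
--         if s[j] == s[nj]:
--             total += int(s[j])
--         j = nj
--     return total
-- ===== Notes on version B (the rewrite author's own statement) =====
-- stated objective: alternative
-- what changed: B splits on the parity of the digit string: for even lengths it exploits the symmetry of the half-circle pairing to compare the two halves once and double the matched digits (half the comparisons and int() calls), and for odd lengths it walks the single cycle generated by stepping half the length, comparing consecutive cycle positions with subtractive wraparound instead of indexing 0..n-1 with modular arithmetic.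
import Mathlib
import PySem

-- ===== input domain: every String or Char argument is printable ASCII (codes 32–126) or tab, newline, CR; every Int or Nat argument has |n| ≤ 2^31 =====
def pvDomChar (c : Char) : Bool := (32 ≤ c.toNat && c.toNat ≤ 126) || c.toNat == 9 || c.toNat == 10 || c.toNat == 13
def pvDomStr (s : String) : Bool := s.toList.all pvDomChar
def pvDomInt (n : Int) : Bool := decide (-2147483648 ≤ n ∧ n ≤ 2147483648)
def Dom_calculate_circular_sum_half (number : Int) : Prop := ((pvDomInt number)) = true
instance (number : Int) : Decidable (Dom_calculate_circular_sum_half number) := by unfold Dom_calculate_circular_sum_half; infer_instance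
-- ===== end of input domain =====

-- B splits by parity: an even-length digit string is handled by comparing its two halves once
-- and doubling the matched digits; an odd-length one by walking the single step-by-half cycle
-- with subtractive wraparound. Alternative decomposition, same asymptotic cost.

-- ===== PORT A =====
-- literal port of A's loop: for i in range(length): if digits[i] == digits[(i+length//2)%length]: sum += int(digits[i])
-- int(digits[i]) is ported as (ofChars? [c]).getD 0; the none case (c = '-') is unreachable since '-' occurs once and never matches.
def calculate_circular_sum_half (number : Int) : Int :=
  let digits := PySem.Int.toChars number
  let length : Int := (digits.length : Int)
  (PySem.List.pyRange 0 length 1).foldl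
    (fun circular_sum i =>
      if PySem.List.pyGetD digits i ' ' =
         PySem.List.pyGetD digits (PySem.Int.mod (i + PySem.Int.floordiv length 2) length) ' '
      then circular_sum + (PySem.Int.ofChars? [PySem.List.pyGetD digits i ' ']).getD 0
      else circular_sum) 0

-- ===== PORT B =====
-- literal port of Source B: even branch zips the two half slices and doubles; odd branch folds the
-- cycle walk 'for _ in range(n)' carrying state (total, j) with subtractive wraparound.
def calculate_circular_sum_half_alt (number : Int) : Int :=
  let s := PySem.Int.toChars number
  let n : Int := (s.length : Int)
  let h : Int := PySem.Int.floordiv n 2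
  if PySem.Int.mod n 2 = 0 then
    2 * ((PySem.List.slice s none (some h)).zip (PySem.List.slice s (some h) none)).foldl
      (fun acc p => if p.1 = p.2 then acc + (PySem.Int.ofChars? [p.1]).getD 0 else acc) 0
  else
    ((PySem.List.pyRange 0 n 1).foldl
      (fun (st : Int × Int) _ =>
        let j := st.2
        let nj0 := j + h
        let nj := if nj0 ≥ n then nj0 - n else nj0
        let total := if PySem.List.pyGetD s j ' ' = PySem.List.pyGetD s nj ' '
                     then st.1 + (PySem.Int.ofChars? [PySem.List.pyGetD s j ' ']).getD 0
                     else st.1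
        (total, nj)) ((0 : Int), (0 : Int))).1

-- ===== PRECONDITION & SPEC =====
def Spec_calculate_circular_sum_half (number : Int) (out : Int) : Prop := out = calculate_circular_sum_half_alt number
instance (number : Int) (out : Int) : Decidable (Spec_calculate_circular_sum_half number out) := by unfold Spec_calculate_circular_sum_half; infer_instance

-- ===== CLAIM (what is proved, stated in full; the proofs are below) =====
def Claim_equal_calculate_circular_sum_half : Prop := ∀ (number : Int), Dom_calculate_circular_sum_half number → Spec_calculate_circular_sum_half number (calculate_circular_sum_half number)

-- ===== LEMMAS AND PROOFS =====

-- the digit value of a character, and the per-index term of A's loop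
def pvVal (c : Char) : Int := (PySem.Int.ofChars? [c]).getD 0

def pvTerm (ds : List Char) (i : Nat) : Int :=
  if ds.getD i ' ' = ds.getD ((i + ds.length / 2) % ds.length) ' ' then pvVal (ds.getD i ' ') else 0

theorem pv_foldl_if_sum {α : Type} (g : α → Int) (c : α → Bool) :
    ∀ (l : List α) (a : Int),
      l.foldl (fun acc x => if c x then acc + g x else acc) a
        = a + (l.map (fun x => if c x then g x else 0)).sum := by
  intro l
  induction l with
  | nil => simp
  | cons x xs ih =>
    intro a
    simp only [List.foldl_cons, List.map_cons, List.sum_cons]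
    by_cases hc : c x
    · simp [hc, ih]; ring
    · simp [hc, ih]

theorem pv_foldl_if_sum' {α : Type} (g : α → Int) (c : α → Prop) [DecidablePred c] :
    ∀ (l : List α) (a : Int),
      l.foldl (fun acc x => if c x then acc + g x else acc) a
        = a + (l.map (fun x => if c x then g x else 0)).sum := by
  intro l
  induction l with
  | nil => simp
  | cons x xs ih =>
    intro a
    simp only [List.foldl_cons, List.map_cons, List.sum_cons]
    by_cases hc : c x
    · simp [hc, ih]; ring
    · simp [hc, ih]

theorem pv_zip_foldl_range (xs : List Char) : ∀ (ys : List Char) (f : Int → Char × Char → Int) (a : Int),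
    ys.length = xs.length →
    (xs.zip ys).foldl f a =
      (List.range xs.length).foldl (fun a i => f a (xs.getD i ' ', ys.getD i ' ')) a := by
  induction xs with
  | nil => intro ys f a h; simp
  | cons x xs ih =>
    intro ys f a h
    cases ys with
    | nil => simp at h
    | cons y ys =>
      simp only [List.zip_cons_cons, List.foldl_cons, List.length_cons]
      rw [List.range_succ_eq_map, List.foldl_cons, List.foldl_map]
      simp only [List.getD_cons_zero, List.getD_cons_succ]
      exact ih ys f (f a (x, y)) (by simpa using h)

theorem pv_A_eq_sum (number : Int) :
    calculate_circular_sum_half number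
      = ((List.range (PySem.Int.toChars number).length).map (pvTerm (PySem.Int.toChars number))).sum := by
  unfold calculate_circular_sum_half
  dsimp only
  set ds := PySem.Int.toChars number with hds
  rw [PySem.List.pyRange_zero_natCast, List.foldl_map]
  have hfd : PySem.Int.floordiv ((ds.length : Nat) : Int) 2 = ((ds.length / 2 : Nat) : Int) :=
    by exact_mod_cast PySem.Int.floordiv_natCast ds.length 2
  have hstep : ∀ (a : Int) (i : Nat),
      (if PySem.List.pyGetD ds (i : Int) ' ' =
          PySem.List.pyGetD ds (PySem.Int.mod ((i : Int) + PySem.Int.floordiv ((ds.length : Nat) : Int) 2) ((ds.length : Nat) : Int)) ' '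
       then a + (PySem.Int.ofChars? [PySem.List.pyGetD ds (i : Int) ' ']).getD 0 else a)
      = (if (decide (ds.getD i ' ' = ds.getD ((i + ds.length / 2) % ds.length) ' ') : Bool) then a + pvVal (ds.getD i ' ') else a) := by
    intro a i
    rw [hfd, show ((i : Nat) : Int) + ((ds.length / 2 : Nat) : Int) = ((i + ds.length / 2 : Nat) : Int) by push_cast; ring,
       PySem.Int.mod_natCast]
    simp only [PySem.List.pyGetD_natCast, pvVal]
    split_ifs <;> simp_all
  refine (PySem.List.foldl_congr_mem (List.range ds.length) _ _ 0 (fun acc i _ => hstep acc i)).trans ?_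
  rw [pv_foldl_if_sum (fun i => pvVal (ds.getD i ' '))
        (fun i => decide (ds.getD i ' ' = ds.getD ((i + ds.length / 2) % ds.length) ' '))]
  rw [zero_add]
  exact congrArg List.sum (List.map_congr_left fun x _ => by simp [pvTerm])

theorem pv_even (ds : List Char) (h : Nat) (hn : ds.length = 2 * h) :
    2 * ((ds.take h).zip (ds.drop h)).foldl
        (fun acc p => if p.1 = p.2 then acc + pvVal p.1 else acc) 0
      = ((List.range ds.length).map (pvTerm ds)).sum := by
  have hh : h ≤ ds.length := by omega
  have hlt : ds.length / 2 = h := by omega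
  have htake : (ds.take h).length = h := by simp [hh]
  have hget1 : ∀ i, i < h → (ds.take h).getD i ' ' = ds.getD i ' ' := by
    intro i hi
    rw [List.getD_eq_getElem _ _ (by omega), List.getD_eq_getElem _ _ (by omega), List.getElem_take]
  have hget2 : ∀ i, i < h → (ds.drop h).getD i ' ' = ds.getD (h + i) ' ' := by
    intro i hi
    rw [List.getD_eq_getElem _ _ (by simp [hn]; omega), List.getD_eq_getElem _ _ (by omega), List.getElem_drop]
  rw [pv_zip_foldl_range (ds.take h) (ds.drop h) _ 0 (by simp [hn]; omega), htake]
  dsimp only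
  rw [PySem.List.foldl_congr_mem (List.range h) _ _ 0
        (fun acc i hi => by
          have hi' : i < h := List.mem_range.mp hi
          rw [hget1 i hi', hget2 i hi']),
      pv_foldl_if_sum' (fun i => pvVal (ds.getD i ' '))
        (fun i => ds.getD i ' ' = ds.getD (h + i) ' '), zero_add]
  have hfront : List.map (pvTerm ds) (List.range h)
      = List.map (fun i => if ds.getD i ' ' = ds.getD (h + i) ' ' then pvVal (ds.getD i ' ') else 0) (List.range h) := by
    refine List.map_congr_left fun i hi => ?_
    have hi' : i < h := List.mem_range.mp hi
    have hm : (i + ds.length / 2) % ds.length = h + i := by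
      rw [hlt, Nat.mod_eq_of_lt (by omega)]; omega
    rw [pvTerm, hm]
  have hback : List.map (pvTerm ds ∘ fun i => h + i) (List.range h)
      = List.map (fun i => if ds.getD i ' ' = ds.getD (h + i) ' ' then pvVal (ds.getD i ' ') else 0) (List.range h) := by
    refine List.map_congr_left fun i hi => ?_
    have hi' : i < h := List.mem_range.mp hi
    have hm : (h + i + ds.length / 2) % ds.length = i := by
      rw [hlt, hn, show h + i + h = i + 1 * (2 * h) by ring, Nat.add_mul_mod_self_right,
          Nat.mod_eq_of_lt (by omega)]
    show pvTerm ds (h + i) = _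
    rw [pvTerm, hm]
    by_cases hc : ds.getD i ' ' = ds.getD (h + i) ' '
    · rw [if_pos hc.symm, if_pos hc, hc]
    · rw [if_neg (fun e => hc e.symm), if_neg hc]
  rw [show ds.length = h + h by omega, List.range_add, List.map_append, List.sum_append,
      List.map_map, hfront, hback]
  ring

theorem pv_odd_inv (ds : List Char) (hcap : Nat) (hn : ds.length = 2 * hcap + 1) :
    ∀ (m : Nat),
      (List.range m).foldl
        (fun (st : Int × Int) _ =>
          let j := st.2
          let nj0 := j + ((hcap : Nat) : Int)
          let nj := if nj0 ≥ ((ds.length : Nat) : Int) then nj0 - ((ds.length : Nat) : Int) else nj0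
          let total := if PySem.List.pyGetD ds j ' ' = PySem.List.pyGetD ds nj ' '
                       then st.1 + pvVal (PySem.List.pyGetD ds j ' ')
                       else st.1
          (total, nj)) ((0 : Int), (0 : Int))
      = (((List.range m).map (fun t => pvTerm ds (t * hcap % ds.length))).sum,
         (((m * hcap % ds.length : Nat)) : Int)) := by
  intro m
  induction m with
  | zero => simp [hn]
  | succ m ih =>
    rw [List.range_succ, List.foldl_append, List.foldl_cons, List.foldl_nil, ih]
    dsimp only
    set n := ds.length with hlen
    have hmodlt : m * hcap % n < n := Nat.mod_lt _ (by omega)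
    have hup : ((m * hcap % n : Nat) : Int) + ((hcap : Nat) : Int) = ((m * hcap % n + hcap : Nat) : Int) := by
      push_cast; ring
    have hnextnat : (m * hcap % n + hcap) % n = (m + 1) * hcap % n := by
      rw [Nat.mod_add_mod]; ring_nf
    have hnj : (if ((m * hcap % n : Nat) : Int) + ((hcap : Nat) : Int) ≥ ((n : Nat) : Int)
                then ((m * hcap % n : Nat) : Int) + ((hcap : Nat) : Int) - ((n : Nat) : Int)
                else ((m * hcap % n : Nat) : Int) + ((hcap : Nat) : Int))
             = (((m + 1) * hcap % n : Nat) : Int) := by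
      rw [hup]
      by_cases hc : m * hcap % n + hcap ≥ n
      · rw [if_pos (by exact_mod_cast hc)]
        have hsub : (m * hcap % n + hcap) % n = m * hcap % n + hcap - n := by
          rw [Nat.mod_eq_sub_mod hc, Nat.mod_eq_of_lt (by omega)]
        rw [← hnextnat, hsub]
        omega
      · rw [if_neg (by exact_mod_cast hc), ← hnextnat,
            Nat.mod_eq_of_lt (show m * hcap % n + hcap < n by omega)]
    rw [hnj]
    have hterm : pvTerm ds (m * hcap % n)
        = if ds.getD (m * hcap % n) ' ' = ds.getD ((m + 1) * hcap % n) ' '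
          then pvVal (ds.getD (m * hcap % n) ' ') else 0 := by
      rw [pvTerm, show n / 2 = hcap from by omega, hnextnat]
    refine Prod.ext ?_ rfl
    dsimp only
    rw [List.map_append, List.sum_append]
    simp only [List.map_cons, List.map_nil, List.sum_cons, List.sum_nil,
               PySem.List.pyGetD_natCast]
    rw [hterm]
    split_ifs with hc2
    · rw [add_zero]
    · rw [add_zero, add_zero]

theorem pv_cycle_mul (n h x : Nat) (hn : n = 2 * h + 1) (hx : x < n) (u v : Nat)
    (huv : u * v = h * (n - 2)) : (x * u % n) * v % n = x := by
  rw [Nat.mod_mul_mod]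
  rcases Nat.eq_zero_or_pos h with h0 | hpos
  · have hn1 : n = 1 := by omega
    have hx0 : x = 0 := by omega
    subst hx0
    simp [hn1]
  · have e : x * u * v = x + (x * (h - 1)) * n := by
      rw [Nat.mul_assoc, huv]
      obtain ⟨k, rfl⟩ := Nat.exists_eq_add_of_le hpos
      subst hn
      rw [show 2 * (1 + k) + 1 - 2 = 2 * k + 1 from by omega,
          show 1 + k - 1 = k from by omega]
      ring
    rw [e, Nat.add_mul_mod_self_right, Nat.mod_eq_of_lt hx]

theorem pv_odd_perm (ds : List Char) (hcap : Nat) (hn : ds.length = 2 * hcap + 1) :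
    ((List.range ds.length).map (fun t => pvTerm ds (t * hcap % ds.length))).sum
      = ((List.range ds.length).map (pvTerm ds)).sum := by
  have hconv : ∀ (f : Nat → Int) (k : Nat), ((List.range k).map f).sum = ∑ i ∈ Finset.range k, f i :=
    fun f k => rfl
  rw [hconv, hconv]
  set n := ds.length with hlen
  have hpos : 0 < n := by omega
  refine Finset.sum_nbij' (fun t => t * hcap % n) (fun i => i * (n - 2) % n) ?_ ?_ ?_ ?_ ?_
  · intro a ha; exact Finset.mem_range.mpr (Nat.mod_lt _ hpos)
  · intro b hb; exact Finset.mem_range.mpr (Nat.mod_lt _ hpos)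
  · intro a ha
    exact pv_cycle_mul n hcap a hn (Finset.mem_range.mp ha) hcap (n - 2) rfl
  · intro b hb
    exact pv_cycle_mul n hcap b hn (Finset.mem_range.mp hb) (n - 2) hcap (by ring)
  · intro a ha; rfl

theorem pv_main (number : Int) :
    calculate_circular_sum_half number = calculate_circular_sum_half_alt number := by
  rw [pv_A_eq_sum]
  unfold calculate_circular_sum_half_alt
  dsimp only
  set ds := PySem.Int.toChars number with hds
  have hfd : PySem.Int.floordiv ((ds.length : Nat) : Int) 2 = ((ds.length / 2 : Nat) : Int) :=
    by exact_mod_cast PySem.Int.floordiv_natCast ds.length 2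
  have hmd : PySem.Int.mod ((ds.length : Nat) : Int) 2 = ((ds.length % 2 : Nat) : Int) :=
    by exact_mod_cast PySem.Int.mod_natCast ds.length 2
  rw [hfd, hmd]
  by_cases hpar : ds.length % 2 = 0
  · rw [if_pos (by exact_mod_cast hpar)]
    rw [PySem.List.slice_to_natCast, PySem.List.slice_from_natCast]
    exact (pv_even ds (ds.length / 2) (by omega)).symm
  · rw [if_neg (by exact_mod_cast hpar)]
    have hodd : ds.length = 2 * (ds.length / 2) + 1 := by omega
    rw [PySem.List.pyRange_zero_natCast, List.foldl_map]
    have h1 := congrArg Prod.fst (pv_odd_inv ds (ds.length / 2) hodd ds.length)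
    exact (h1.trans (pv_odd_perm ds (ds.length / 2) hodd)).symm

-- ===== VERDICT (by name: the statement is the Claim_ definition above) =====
theorem calculate_circular_sum_half_spec : Claim_equal_calculate_circular_sum_half := by
  intro number _
  unfold Spec_calculate_circular_sum_half
  exact pv_main number
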